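-- pv_equiv track=rewrite | github.com/Vieira-zj/zj_new_py_app | pysort/qa_interview.py | alg_demo06
-- ===== SOURCE A (Python) =====
-- def alg_demo06(aba_str: str) -> str:
--     """
--     过滤掉输入字符串中的驼峰字符串（aba）。
--     input: AaabxbcdyayBxxy
--     output: AaacdBxxy
--     """
--     def is_aba_string(input_str):
--         return input_str[0] == input_str[2]
--
--     local_str = aba_str[:]
--     i = 0
--     while i < (len(local_str) - 2):
--         if is_aba_string(local_str[i:i+3]):
--             local_str = local_str[0:i] + local_str[i+3:]
--         else:
--             i += 1
--     return local_str
-- ===== SOURCE B (Python) =====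
-- def alg_demo06(aba_str: str) -> str:
--     # Single left-to-right pass over the original string with an index:
--     # peek 3 chars; on an aba match skip all 3, else commit one char.
--     out = []
--     s = aba_str
--     j, n = 0, len(s)
--     while j + 2 < n:
--         if s[j] == s[j + 2]:
--             j += 3
--         else:
--             out.append(s[j])
--             j += 1
--     return ''.join(out) + s[j:]
-- ===== Notes on version B (the rewrite author's own statement) =====
-- stated objective: faster
-- what changed: Replaces the while-loop that repeatedly splices the whole string (local_str = local_str[0:i] + local_str[i+3:]) with a single index-based pass over the original string that either skips 3 matched chars or commits 1 to an output buffer.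
import Mathlib
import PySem

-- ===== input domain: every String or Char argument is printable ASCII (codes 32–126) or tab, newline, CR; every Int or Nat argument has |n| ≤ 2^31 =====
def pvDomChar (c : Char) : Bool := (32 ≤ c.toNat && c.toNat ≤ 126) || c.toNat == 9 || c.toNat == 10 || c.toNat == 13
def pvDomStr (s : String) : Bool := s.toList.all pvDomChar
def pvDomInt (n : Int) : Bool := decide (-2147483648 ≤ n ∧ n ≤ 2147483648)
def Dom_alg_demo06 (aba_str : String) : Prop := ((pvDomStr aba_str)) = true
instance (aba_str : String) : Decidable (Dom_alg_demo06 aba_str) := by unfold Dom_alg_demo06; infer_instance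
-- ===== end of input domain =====

-- B replaces A's repeated whole-string splicing with one linear index pass (skip 3 on match, commit 1 otherwise): asymptotically faster.


-- ===== PORT A =====
-- is_aba_string(input_str): input_str[0] == input_str[2]  (indices always in range at the call site)
def isAbaString (input_str : List Char) : Bool :=
  PySem.List.pyGet? input_str 0 == PySem.List.pyGet? input_str 2

-- local_str[0:i] + local_str[i+3:] as take/drop (used by the port's termination proof and the proofs below)
theorem spliceA_eq (s : List Char) (i : Nat) :
    PySem.List.slice s (some 0) (some (i : Int)) ++ PySem.List.slice s (some ((i : Int) + 3)) none =
      s.take i ++ s.drop (i + 3) := by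
  rw [show ((i : Int) + 3) = ((i + 3 : Nat) : Int) by push_cast; ring,
      PySem.List.slice_from_natCast, PySem.List.slice_zero_start, PySem.List.slice_to_natCast]

-- while i < len(local_str) - 2: … ; the guard 'i < len - 2' over Python ints is 'i + 2 < len' here (i, len ≥ 0)
def loopA (local_str : List Char) (i : Nat) : List Char :=
  if h : i + 2 < local_str.length then
    if isAbaString (PySem.List.slice local_str (some (i : Int)) (some ((i : Int) + 3))) then
      loopA (PySem.List.slice local_str (some 0) (some (i : Int)) ++
             PySem.List.slice local_str (some ((i : Int) + 3)) none) i
    else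
      loopA local_str (i + 1)
  else
    local_str
termination_by local_str.length - i
decreasing_by
  · rw [spliceA_eq]; simp; omega
  · omega

def alg_demo06 (aba_str : String) : String :=
  String.ofList (loopA aba_str.toList 0)

-- ===== PORT B =====
-- while j + 2 < n: if s[j] == s[j+2]: j += 3 else: out.append(s[j]); j += 1 ; returns ''.join(out) + s[j:]
def loopB (s : List Char) (j : Nat) (out : List Char) : List Char :=
  if j + 2 < s.length then
    if s.getD j ' ' == s.getD (j + 2) ' ' then
      loopB s (j + 3) out
    else
      loopB s (j + 1) (out ++ [s.getD j ' '])
  else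
    out ++ s.drop j
termination_by s.length - j

def alg_demo06_alt (aba_str : String) : String :=
  String.ofList (loopB aba_str.toList 0 [])

-- ===== PRECONDITION & SPEC =====
def Spec_alg_demo06 (aba_str : String) (out : String) : Prop := out = alg_demo06_alt aba_str
instance (aba_str : String) (out : String) : Decidable (Spec_alg_demo06 aba_str out) := by unfold Spec_alg_demo06; infer_instance

-- ===== CLAIM (what is proved, stated in full; the proofs are below) =====
def Claim_equal_alg_demo06 : Prop := ∀ (aba_str : String), Dom_alg_demo06 aba_str → Spec_alg_demo06 aba_str (alg_demo06 aba_str)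

-- ===== LEMMAS AND PROOFS =====

-- the common mathematical description: remove 3 on an aba match, keep 1 otherwise
def goSpec : List Char → List Char
  | a :: b :: c :: rest => if a == c then goSpec rest else a :: goSpec (b :: c :: rest)
  | xs => xs

theorem goSpec_cons3 (a b c : Char) (r : List Char) :
    goSpec (a :: b :: c :: r) = if a == c then goSpec r else a :: goSpec (b :: c :: r) := rfl

theorem goSpec_short (xs : List Char) (h : xs.length < 3) : goSpec xs = xs := by
  match xs, h with
  | [], _ => rfl
  | [_], _ => rfl
  | [_, _], _ => rfl

theorem drop_cons3 (s : List Char) (i : Nat) (h : i + 2 < s.length) :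
    s.drop i = s[i] :: s[i+1] :: s[i+2] :: s.drop (i + 3) := by
  rw [List.drop_eq_getElem_cons (by omega), List.drop_eq_getElem_cons (by omega),
      List.drop_eq_getElem_cons (by omega)]

theorem loopA_eq (s : List Char) (i : Nat) :
    loopA s i = s.take i ++ goSpec (s.drop i) := by
  fun_induction loopA s i with
  | case1 s i h hm ih =>
    rw [spliceA_eq] at ih
    have hd := drop_cons3 s i h
    -- the sliced window is [s[i], s[i+1], s[i+2]]
    have hwin : PySem.List.slice s (some (i : Int)) (some ((i : Int) + 3)) =
        [s[i], s[i+1], s[i+2]] := by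
      rw [show ((i : Int) + 3) = ((i + 3 : Nat) : Int) by push_cast; ring, PySem.List.slice_natCast]
      rw [show (s.drop i).take (i + 3 - i) = (s.drop i).take 3 by congr 1; omega]
      rw [hd]; rfl
    have hac : s[i] = s[i+2]'(by omega) := by
      have := hm
      rw [hwin] at this
      simpa [isAbaString, PySem.List.pyGet?, PySem.List.pyIdx?] using this
    have htk : (s.take i ++ s.drop (i + 3)).take i = s.take i := by
      rw [List.take_append_of_le_length (by simp; omega)]
      simp
    have hdr : (s.take i ++ s.drop (i + 3)).drop i = s.drop (i + 3) := by
      rw [List.drop_append_of_le_length (by simp; omega)]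
      simp
    rw [spliceA_eq, ih, htk, hdr, hd]
    simp [goSpec, hac]
  | case2 s i h hm ih =>
    have hd := drop_cons3 s i h
    have hd1 : s.drop (i + 1) = s[i+1] :: s[i+2] :: s.drop (i + 3) := by
      have := drop_cons3 s i h
      rw [List.drop_eq_getElem_cons (l := s) (i := i) (by omega)] at this
      exact (List.cons.injEq _ _ _ _).mp this |>.2
    have hwin : PySem.List.slice s (some (i : Int)) (some ((i : Int) + 3)) =
        [s[i], s[i+1], s[i+2]] := by
      rw [show ((i : Int) + 3) = ((i + 3 : Nat) : Int) by push_cast; ring, PySem.List.slice_natCast]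
      rw [show (s.drop i).take (i + 3 - i) = (s.drop i).take 3 by congr 1; omega]
      rw [hd]; rfl
    have hac : ¬ s[i] = s[i+2]'(by omega) := by
      have := hm
      rw [hwin] at this
      simpa [isAbaString, PySem.List.pyGet?, PySem.List.pyIdx?] using this
    have ht : s.take (i + 1) = s.take i ++ [s[i]] := by
      rw [List.take_add_one]
      simp [List.getElem?_eq_getElem (show i < s.length by omega)]
    rw [ih, hd, goSpec_cons3, if_neg (by simpa using hac), ← hd1, ht, List.append_assoc]
    rfl
  | case3 s i h =>
    rw [goSpec_short _ (by simp; omega), List.take_append_drop]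

theorem loopB_eq (s : List Char) (j : Nat) (out : List Char) :
    loopB s j out = out ++ goSpec (s.drop j) := by
  fun_induction loopB s j out with
  | case1 j out h hm ih =>
    have hd := drop_cons3 s j h
    have hac : s[j] = s[j+2]'(by omega) := by
      simpa [List.getD, List.getElem?_eq_getElem (show j < s.length by omega),
             List.getElem?_eq_getElem (show j + 2 < s.length from h)] using hm
    rw [ih, hd]
    simp [goSpec, hac]
  | case2 j out h hm ih =>
    have hd := drop_cons3 s j h
    have hd1 : s.drop (j + 1) = s[j+1] :: s[j+2] :: s.drop (j + 3) := by
      have := hd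
      rw [List.drop_eq_getElem_cons (l := s) (i := j) (by omega)] at this
      exact (List.cons.injEq _ _ _ _).mp this |>.2
    have hac : ¬ s[j] = s[j+2]'(by omega) := by
      simpa [List.getD, List.getElem?_eq_getElem (show j < s.length by omega),
             List.getElem?_eq_getElem (show j + 2 < s.length from h)] using hm
    rw [ih, hd, hd1]
    simp [goSpec, hac, List.getD, List.getElem?_eq_getElem (show j < s.length by omega)]
  | case3 j out h =>
    rw [goSpec_short _ (by simp; omega)]

-- ===== VERDICT (by name: the statement is the Claim_ definition above) =====
theorem alg_demo06_spec : Claim_equal_alg_demo06 := by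
  intro s _
  unfold Spec_alg_demo06 alg_demo06 alg_demo06_alt
  rw [loopA_eq, loopB_eq]
  simp
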